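-- pv_equiv track=rewrite | github.com/BOLTB0X/DataStructure_Argolithm | BOJ/Greedy/16200.py | solution
-- ===== SOURCE A (Python) =====
-- def solution(n, x):
--     ret = 0
--
--     x.sort()
--     team = []
--     teamLength = 0
--     teamLimit = 0
--
--     for i in range(n):
--         if not team:
--             teamLimit = x[i]
--
--         team.append(x[i])
--         teamLength += 1
--
--         if teamLimit == teamLength:
--             ret += 1
--             teamLimit = 0
--             teamLength = 0
--             team = []
--
--     if team:
--         ret += 1
--
--     return ret
-- ===== SOURCE B (Python) =====
-- def solution(n, x):
--     # B: sort in place (same mutation as A), then jump by team size instead of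
--     # accumulating members one at a time.
--     x.sort()
--     ret = 0
--     i = 0
--     while i < n:
--         ret += 1
--         step = x[i]
--         if step <= 0:
--             break
--         i += step
--     return ret
-- ===== Notes on version B (the rewrite author's own statement) =====
-- stated objective: alternative
-- what changed: B replaces A's per-element accumulation of a team list with index-jumping over the sorted list: each team is counted once and the index advances by the team leader's value, so the loop runs once per team and does no list appends.
import Mathlib
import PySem

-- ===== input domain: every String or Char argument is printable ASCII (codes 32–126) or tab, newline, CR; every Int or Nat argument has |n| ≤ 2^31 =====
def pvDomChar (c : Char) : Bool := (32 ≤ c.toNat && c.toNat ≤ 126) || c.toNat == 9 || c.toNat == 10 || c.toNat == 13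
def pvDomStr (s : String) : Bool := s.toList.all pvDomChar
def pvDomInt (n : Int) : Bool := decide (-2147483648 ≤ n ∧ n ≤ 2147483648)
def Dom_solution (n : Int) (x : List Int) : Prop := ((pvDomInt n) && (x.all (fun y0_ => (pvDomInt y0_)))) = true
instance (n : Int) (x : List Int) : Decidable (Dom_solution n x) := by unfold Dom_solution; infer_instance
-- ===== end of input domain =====

-- B counts teams by jumping over the sorted list by the team leader's value instead of
-- accumulating a team list member by member; equivalence is about the RETURN value
-- (both Pythons sort x in place, the same side effect).

-- ===== PORT A =====
-- state: (ret, team, teamLength, teamLimit)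
def solStepA (xs : List Int) (s : Int × List Int × Int × Int) (i : Int) :
    Int × List Int × Int × Int :=
  let (ret, team, teamLength, teamLimit) := s
  let teamLimit := if team.isEmpty then (PySem.List.pyGet? xs i).getD 0 else teamLimit
  let team := team ++ [(PySem.List.pyGet? xs i).getD 0]
  let teamLength := teamLength + 1
  if teamLimit = teamLength then (ret + 1, [], 0, 0) else (ret, team, teamLength, teamLimit)

def solFinish (s : Int × List Int × Int × Int) : Int :=
  if s.2.1.isEmpty then s.1 else s.1 + 1

def solution (n : Int) (x : List Int) : Int :=
  let xs := PySem.List.sorted x (fun v => v) false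
  solFinish ((PySem.List.pyRange 0 n 1).foldl (solStepA xs) (0, [], 0, 0))

-- ===== PORT B =====
def altLoop (xs : List Int) (n : Int) (i : Int) (ret : Int) : Int :=
  if _h : i < n then
    let ret := ret + 1
    let step := (PySem.List.pyGet? xs i).getD 0
    if _hs : step ≤ 0 then ret
    else altLoop xs n (i + step) ret
  else ret
termination_by (n - i).toNat
decreasing_by omega

def solution_alt (n : Int) (x : List Int) : Int :=
  altLoop (PySem.List.sorted x (fun v => v) false) n 0 0

-- ===== PRECONDITION & SPEC =====
-- Pre_ excludes exactly the inputs where A raises IndexError: n larger than len(x).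
def Pre_solution (n : Int) (x : List Int) : Prop := n ≤ (x.length : Int)
instance (n : Int) (x : List Int) : Decidable (Pre_solution n x) := by
  unfold Pre_solution; infer_instance

def pvWitness_solution : Int × List Int := (5, [2, 1, 3, 2, 2])

def Spec_solution (n : Int) (x : List Int) (out : Int) : Prop := out = solution_alt n x
instance (n : Int) (x : List Int) (out : Int) : Decidable (Spec_solution n x out) := by
  unfold Spec_solution; infer_instance

-- ===== CLAIM (what is proved, stated in full; the proofs are below) =====
def Claim_equal_solution : Prop := ∀ (n : Int) (x : List Int), Dom_solution n x → Pre_solution n x → Spec_solution n x (solution n x)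

-- ===== LEMMAS AND PROOFS =====

-- While the team never empties and its limit is non-positive, it never completes:
-- the fold just grows the team, and the final check adds exactly one.
lemma solFold_nonpos (xs : List Int) (L : List Int) :
    ∀ (ret c lim : Int) (t : List Int), t ≠ [] → 1 ≤ c → lim ≤ 0 →
      solFinish (L.foldl (solStepA xs) (ret, t, c, lim)) = ret + 1 := by
  induction L with
  | nil =>
      intro ret c lim t ht _ _
      simp [solFinish, List.isEmpty_iff, ht]
  | cons j L ih =>
      intro ret c lim t ht hc hlim
      have h1 : t.isEmpty = false := by simp [ht]
      have hne : ¬ lim = c + 1 := by omega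
      simp only [List.foldl_cons, solStepA, h1, Bool.false_eq_true, if_false, if_neg hne]
      exact ih ret (c + 1) lim _ (by simp) (by omega) hlim

-- A mid-team run with positive limit: the team completes after (lim - c) more
-- elements (then the fold restarts from the empty state), or the range runs out
-- first and the final check counts the leftover team.
lemma solFold_mid (xs : List Int) (n lim : Int) :
    ∀ (d : ℕ) (i c ret : Int) (t : List Int), t ≠ [] → 1 ≤ c → c < lim →
      (lim - c).toNat = d →
      solFinish ((PySem.List.pyRange i n 1).foldl (solStepA xs) (ret, t, c, lim)) =
        if i + (lim - c) ≤ n then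
          solFinish ((PySem.List.pyRange (i + (lim - c)) n 1).foldl (solStepA xs)
            (ret + 1, ([] : List Int), 0, 0))
        else ret + 1 := by
  intro d
  induction d with
  | zero => intro i c ret t _ _ hlt hd; omega
  | succ d ih =>
      intro i c ret t ht hc hlt hd
      have h1 : t.isEmpty = false := by simp [ht]
      by_cases hin : i < n
      · rw [PySem.List.pyRange_one_cons hin]
        simp only [List.foldl_cons, solStepA, h1, Bool.false_eq_true, if_false]
        by_cases hdone : lim = c + 1
        · rw [if_pos hdone]
          have heq : i + (lim - c) = i + 1 := by omega
          rw [heq, if_pos (by omega)]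
        · rw [if_neg hdone]
          rw [ih (i + 1) (c + 1) ret _ (by simp) (by omega) (by omega) (by omega)]
          have heq : i + 1 + (lim - (c + 1)) = i + (lim - c) := by omega
          rw [heq]
      · rw [PySem.List.pyRange_one_eq_nil (by omega)]
        rw [if_neg (by omega)]
        simp [solFinish, List.isEmpty_iff, ht]

-- Main invariant: A's fold over range(i, n) from the empty-team state, plus the
-- leftover-team adjustment, equals B's jump loop from index i.
lemma solFold_eq_altLoop (xs : List Int) (n : Int) :
    ∀ (fuel : ℕ) (i ret : Int), (n - i).toNat ≤ fuel →
      solFinish ((PySem.List.pyRange i n 1).foldl (solStepA xs) (ret, [], 0, 0)) =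
        altLoop xs n i ret := by
  intro fuel
  induction fuel with
  | zero =>
      intro i ret hf
      have hin : ¬ i < n := by omega
      rw [PySem.List.pyRange_one_eq_nil (by omega), altLoop, dif_neg hin]
      simp [solFinish]
  | succ fuel ih =>
      intro i ret hf
      by_cases hin : i < n
      · rw [PySem.List.pyRange_one_cons hin, altLoop, dif_pos hin]
        simp only [List.foldl_cons, solStepA, List.isEmpty_nil, if_true, List.nil_append,
          zero_add]
        set v : Int := (PySem.List.pyGet? xs i).getD 0 with hv
        by_cases hv1 : v = 1
        · rw [if_pos hv1, ih (i + 1) (ret + 1) (by omega), dif_neg (by omega)]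
          congr 1
          omega
        · rw [if_neg hv1]
          by_cases hpos : v ≤ 0
          · rw [dif_pos hpos]
            exact solFold_nonpos xs _ ret 1 v [v] (by simp) le_rfl hpos
          · rw [dif_neg hpos]
            have h2 : 1 < v := by omega
            rw [solFold_mid xs n v (v - 1).toNat (i + 1) 1 ret [v] (by simp) le_rfl h2 rfl]
            have heq : i + 1 + (v - 1) = i + v := by omega
            rw [heq]
            by_cases hle : i + v ≤ n
            · rw [if_pos hle, ih (i + v) (ret + 1) (by omega)]
            · rw [if_neg hle, altLoop, dif_neg (by omega)]
      · rw [PySem.List.pyRange_one_eq_nil (by omega), altLoop, dif_neg hin]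
        simp [solFinish]

-- ===== VERDICT (by name: the statement is the Claim_ definition above) =====
theorem solution_spec : Claim_equal_solution := by
  intro n x _ _
  unfold Spec_solution solution solution_alt
  exact solFold_eq_altLoop _ n (n - 0).toNat 0 0 (by omega)
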